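-- pv_equiv track=rewrite | github.com/stefan-ivi/adventOfCode | Day 3: Binary Diagnostic/Binary Diagnostic.py | find_smaller
-- ===== SOURCE A (Python) =====
-- def find_smaller(diagnostics, i):
--     if len(diagnostics) == 1:
--         return diagnostics
--
--     bits_ones = []
--     bits_zeros = []
--
--     for diagnostic in diagnostics:
--         if int(diagnostic[i]) == 1:
--             bits_ones.append(diagnostic)
--         else:
--             bits_zeros.append(diagnostic)
--
--     if len(bits_ones) < len(bits_zeros):
--         i += 1
--         return find_smaller(bits_ones, i)
--     else:
--         i += 1
--         return find_smaller(bits_zeros, i)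
-- ===== SOURCE B (Python) =====
-- def find_smaller(diagnostics, i):
--     # Iterative re-implementation: a while loop with list comprehensions
--     # instead of recursion with manual append loops; same tie-break
--     # (equal counts keep the zeros bucket).
--     while len(diagnostics) != 1:
--         bits_ones = [d for d in diagnostics if int(d[i]) == 1]
--         bits_zeros = [d for d in diagnostics if int(d[i]) != 1]
--         diagnostics = bits_ones if len(bits_ones) < len(bits_zeros) else bits_zeros
--         i += 1
--     return diagnostics
-- ===== Notes on version B (the rewrite author's own statement) =====
-- stated objective: idiomatic
-- what changed: Recursion with two manual append-accumulator lists is replaced by an iterative while-loop that rebuilds the two buckets with list comprehensions and reassigns diagnostics each round (same minority/tie-break rule).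
import Mathlib
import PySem

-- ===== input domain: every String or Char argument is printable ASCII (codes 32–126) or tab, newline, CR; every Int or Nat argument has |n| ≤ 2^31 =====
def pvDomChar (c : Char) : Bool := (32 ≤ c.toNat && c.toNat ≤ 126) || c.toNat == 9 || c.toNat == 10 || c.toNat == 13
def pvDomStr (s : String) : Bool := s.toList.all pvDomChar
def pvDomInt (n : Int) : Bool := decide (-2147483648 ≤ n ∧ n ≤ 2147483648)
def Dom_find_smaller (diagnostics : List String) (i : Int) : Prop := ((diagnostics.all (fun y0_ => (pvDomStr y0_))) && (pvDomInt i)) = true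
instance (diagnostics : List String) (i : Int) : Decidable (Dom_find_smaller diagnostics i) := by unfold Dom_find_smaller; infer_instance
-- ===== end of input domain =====

-- B replaces A's recursion-with-append-loops by an iterative while-loop over
-- comprehension-built buckets (objective: idiomatic); same return value wherever A
-- returns (where A raises, B may itself loop/raise — outside Pre_, nothing is claimed).

-- `int(d[i])`, the expression both Python sources contain.
def pvBit? (d : String) (i : Int) : Option Int :=
  (PySem.Str.pyGet? d i).bind (fun c => PySem.Int.ofStr? (String.singleton c))

-- Largest string length in the input: every round of either Python reads d[i] with a
-- strictly increasing i, which is a valid index only while -maxLen ≤ i < maxLen, so a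
-- returning run has at most 2*maxLen rounds; `2*maxLen + 2` fuel therefore never runs
-- out on any input admitted by Pre_ (a totality device, not part of the algorithm).
def pvMaxLen (ds : List String) : Nat := (ds.map (fun d => d.toList.length)).foldr max 0

-- ===== PORT A =====
def pvFindA : Nat → List String → Int → List String
  | 0, ds, _ => ds          -- unreachable under Pre_
  | Nat.succ fuel, diagnostics, i =>
    if diagnostics.length = 1 then diagnostics
    else
      let p := diagnostics.foldl
        (fun (acc : List String × List String) d =>
          if pvBit? d i == some 1 then (acc.1 ++ [d], acc.2) else (acc.1, acc.2 ++ [d]))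
        ([], [])
      if p.1.length < p.2.length then pvFindA fuel p.1 (i + 1)
      else pvFindA fuel p.2 (i + 1)

def find_smaller (diagnostics : List String) (i : Int) : List String :=
  pvFindA (2 * pvMaxLen diagnostics + 2) diagnostics i

-- ===== PORT B =====
def pvFindB : Nat → List String → Int → List String
  | 0, ds, _ => ds          -- unreachable under Pre_
  | Nat.succ fuel, diagnostics, i =>
    if diagnostics.length ≠ 1 then
      let bits_ones := diagnostics.filter (fun d => pvBit? d i == some 1)
      let bits_zeros := diagnostics.filter (fun d => !(pvBit? d i == some 1))
      pvFindB fuel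
        (if bits_ones.length < bits_zeros.length then bits_ones else bits_zeros) (i + 1)
    else diagnostics

def find_smaller_alt (diagnostics : List String) (i : Int) : List String :=
  pvFindB (2 * pvMaxLen diagnostics + 2) diagnostics i

-- ===== PRECONDITION & SPEC =====
-- One round of partitioning (the value both Pythons pass to the next round).
def pvStep (ds : List String) (i : Int) : List String :=
  if (ds.filter (fun d => pvBit? d i == some 1)).length <
     (ds.filter (fun d => !(pvBit? d i == some 1))).length
  then ds.filter (fun d => pvBit? d i == some 1)
  else ds.filter (fun d => !(pvBit? d i == some 1))

-- `pvOk n ds i` = the iterated partition reaches a singleton within n rounds, every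
-- round reading a parseable digit d[i] from every string.
def pvOk : Nat → List String → Int → Bool
  | 0, _, _ => false
  | Nat.succ n, ds, i =>
    ds.length == 1 ||
      (ds.all (fun d => (pvBit? d i).isSome) && pvOk n (pvStep ds i) (i + 1))

-- Pre_ holds EXACTLY where Python A returns: the iterated partition reaches a singleton
-- (each round with every d[i] a parseable digit) before running off the strings.  Outside
-- it A raises (ValueError/IndexError from int(d[i]), or RecursionError once a round
-- yields the empty list).  A's returning set is genuinely this reachability property —
-- it depends on the bucket counts of successive rounds and has no simpler closed form —
-- so Pre_ states it directly, bounded by 2*maxLen+2 rounds, past which every run of A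
-- has necessarily raised (each round consumes one valid index i of the input's strings).
def Pre_find_smaller (diagnostics : List String) (i : Int) : Prop :=
  pvOk (2 * pvMaxLen diagnostics + 2) diagnostics i = true
instance (diagnostics : List String) (i : Int) : Decidable (Pre_find_smaller diagnostics i) := by
  unfold Pre_find_smaller; infer_instance

def pvWitness_find_smaller : List String × Int := (["10", "01", "00"], 0)

def Spec_find_smaller (diagnostics : List String) (i : Int) (out : List String) : Prop := out = find_smaller_alt diagnostics i
instance (diagnostics : List String) (i : Int) (out : List String) : Decidable (Spec_find_smaller diagnostics i out) := by unfold Spec_find_smaller; infer_instance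

-- ===== CLAIM =====
def Claim_equal_find_smaller : Prop := ∀ (diagnostics : List String) (i : Int), Dom_find_smaller diagnostics i → Pre_find_smaller diagnostics i → Spec_find_smaller diagnostics i (find_smaller diagnostics i)

-- ===== LEMMAS AND PROOFS =====

-- A's accumulator loop computes the two filters (generalised over the accumulators).
theorem pvFoldl_partition (ds : List String) (i : Int) (as bs : List String) :
    ds.foldl
      (fun (acc : List String × List String) d =>
        if pvBit? d i == some 1 then (acc.1 ++ [d], acc.2) else (acc.1, acc.2 ++ [d]))
      (as, bs)
    = (as ++ ds.filter (fun d => pvBit? d i == some 1),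
       bs ++ ds.filter (fun d => !(pvBit? d i == some 1))) := by
  induction ds generalizing as bs with
  | nil => simp
  | cons d ds ih =>
    by_cases h : (pvBit? d i == some 1) = true
    · rw [List.foldl_cons, if_pos h, ih, List.filter_cons, List.filter_cons]
      simp [h]
    · rw [List.foldl_cons, if_neg h, ih, List.filter_cons, List.filter_cons]
      simp [h]

-- With the same fuel, the two fueled loops agree on every input `pvOk` accepts.
theorem pvFind_agree (fuel : Nat) :
    ∀ (ds : List String) (i : Int), pvOk fuel ds i = true →
      pvFindA fuel ds i = pvFindB fuel ds i := by
  induction fuel with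
  | zero => intro ds i h; simp [pvOk] at h
  | succ fuel ih =>
    intro ds i h
    by_cases h1 : ds.length = 1
    · simp [pvFindA, pvFindB, h1]
    · rw [pvOk] at h
      simp only [Bool.or_eq_true, Bool.and_eq_true, beq_iff_eq] at h
      rcases h with h | ⟨_, hrec⟩
      · exact absurd h h1
      · rw [pvFindA, pvFindB, if_neg h1, if_pos h1]
        simp only [pvFoldl_partition ds i [] [], List.nil_append]
        rw [pvStep] at hrec
        by_cases hlt : (ds.filter (fun d => pvBit? d i == some 1)).length <
            (ds.filter (fun d => !(pvBit? d i == some 1))).length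
        · rw [if_pos hlt, if_pos hlt]
          exact ih _ _ (by rw [if_pos hlt] at hrec; exact hrec)
        · rw [if_neg hlt, if_neg hlt]
          exact ih _ _ (by rw [if_neg hlt] at hrec; exact hrec)

-- ===== VERDICT =====
theorem find_smaller_spec : Claim_equal_find_smaller := by
  intro ds i _ hPre
  unfold Spec_find_smaller find_smaller find_smaller_alt
  exact pvFind_agree _ ds i hPre
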